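-- pv_equiv track=rewrite | github.com/tbd5675/CS1Fall2017 | double_add5.py | find_start_forward
-- ===== SOURCE A (Python) =====
-- def find_start_forward(goal, count):
--     startinitial=0
--     start=0
--     while(start<=goal):
--         countinitial = count
--         startinitial=startinitial+1
--         start=startinitial
--         while countinitial > 0:
--             start = start * 2 + 5
--             countinitial = countinitial - 1
--     return startinitial
-- ===== SOURCE B (Python) =====
-- def find_start_forward(goal, count):
--     if goal < 0:
--         return 0
--     c = count if count > 0 else 0
--     # grow p = 2^i, stopping early once p alone exceeds goal + 5
--     p = 1
--     i = 0
--     while i < c and p <= goal + 5: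
--         p *= 2
--         i += 1
--     if i < c:
--         return 1
--     q = (goal + 5 - 5 * p) // p + 1
--     return q if q > 1 else 1
-- ===== Notes on version B (the rewrite author's own statement) =====
-- stated objective: faster
-- what changed: A increments a candidate seed from 1 and re-runs the count-step 2x+5 loop for each one until the result exceeds goal; B computes the smallest seed directly from the closed form f^count(s) = 2^count*s + 5*(2^count - 1), using a doubling loop that stops as soon as the power of two alone exceeds goal+5.
import Mathlib
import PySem

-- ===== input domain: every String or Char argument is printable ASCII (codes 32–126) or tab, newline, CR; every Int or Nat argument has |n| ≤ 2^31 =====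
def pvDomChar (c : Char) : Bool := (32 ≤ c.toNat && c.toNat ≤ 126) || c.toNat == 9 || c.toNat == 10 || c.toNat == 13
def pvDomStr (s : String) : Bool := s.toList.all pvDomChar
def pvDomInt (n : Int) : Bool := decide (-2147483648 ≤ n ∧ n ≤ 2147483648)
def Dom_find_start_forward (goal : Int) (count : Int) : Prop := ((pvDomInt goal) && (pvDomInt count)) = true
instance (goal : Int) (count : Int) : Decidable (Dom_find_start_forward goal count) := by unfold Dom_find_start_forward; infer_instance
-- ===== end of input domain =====

-- B replaces A's linear search (re-running the 2x+5 loop for every candidate seed) by a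
-- doubling loop plus the closed form f^c(s) = 2^c·s + 5(2^c−1) solved directly (objective: faster).

-- ===== PORT A =====
-- inner while loop of A: 'while countinitial > 0: start = start*2+5' (count.toNat iterations)
def pvInnerA (c : Nat) (start : Int) : Int :=
  match c with
  | 0 => start
  | n + 1 => pvInnerA n (start * 2 + 5)

-- outer while loop of A; the fuel only makes the recursion total: A's loop stops once
-- startinitial exceeds goal, so (goal+1).toNat fuel is never exhausted
def pvOuterA (goal : Int) (count : Int) (startinitial : Int) (start : Int) (fuel : Nat) : Int :=
  if start ≤ goal then
    match fuel with
    | 0 => startinitial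
    | n + 1 =>
        let si := startinitial + 1
        let st := pvInnerA count.toNat si
        pvOuterA goal count si st n
  else startinitial

def find_start_forward (goal : Int) (count : Int) : Int :=
  pvOuterA goal count 0 0 (goal + 1).toNat

-- ===== PORT B =====
-- B's doubling loop: 'while i < c and p <= goal + 5: p *= 2; i += 1'; fuel (c - i).toNat
-- only makes it total (i increases toward c every iteration)
def pvPowLoop (goal : Int) (c : Int) (p : Int) (i : Int) (fuel : Nat) : Int × Int :=
  match fuel with
  | 0 => (p, i)
  | n + 1 =>
    if i < c ∧ p ≤ goal + 5 then pvPowLoop goal c (p * 2) (i + 1) n else (p, i)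

def find_start_forward_alt (goal : Int) (count : Int) : Int :=
  if goal < 0 then 0
  else
    let c : Int := if count > 0 then count else 0
    let (p, i) := pvPowLoop goal c 1 0 c.toNat
    if i < c then 1
    else
      let q := PySem.Int.floordiv (goal + 5 - 5 * p) p + 1
      if q > 1 then q else 1

-- ===== PRECONDITION & SPEC =====
def Spec_find_start_forward (goal : Int) (count : Int) (out : Int) : Prop := out = find_start_forward_alt goal count
instance (goal : Int) (count : Int) (out : Int) : Decidable (Spec_find_start_forward goal count out) := by unfold Spec_find_start_forward; infer_instance

-- ===== CLAIM (what is proved, stated in full; the proofs are below) =====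
def Claim_equal_find_start_forward : Prop := ∀ (goal : Int) (count : Int), Dom_find_start_forward goal count → Spec_find_start_forward goal count (find_start_forward goal count)

-- ===== LEMMAS AND PROOFS =====

-- A's inner loop in closed form: f^c(x) = 2^c·x + 5·(2^c − 1)
theorem pvInnerA_eq (c : Nat) (x : Int) : pvInnerA c x = 2 ^ c * x + 5 * (2 ^ c - 1) := by
  induction c generalizing x with
  | zero => simp [pvInnerA]
  | succ n ih => simp [pvInnerA, ih, pow_succ]; ring

-- the smallest integer seed whose iterate exceeds goal
def pvQ (goal : Int) (P : Int) : Int := PySem.Int.floordiv (goal + 5 - 5 * P) P + 1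

theorem pvQ_le_iff (goal P s : Int) (hP : 0 < P) :
    pvQ goal P ≤ s ↔ goal < P * s + 5 * (P - 1) := by
  unfold pvQ
  rw [Int.add_one_le_iff, PySem.Int.floordiv_lt_iff_lt_mul hP]
  constructor <;> intro h <;> nlinarith

-- A's outer loop returns the first seed ≥ si whose iterate exceeds goal, i.e. max si (pvQ …)
theorem pvOuterA_eq (goal : Int) (count : Int) (si : Int) (fuel : Nat)
    (hsi : 1 ≤ si) (hfuel : goal < si + fuel) :
    pvOuterA goal count si (pvInnerA count.toNat si) fuel = max si (pvQ goal (2 ^ count.toNat)) := by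
  have hP : (0:Int) < 2 ^ count.toNat := by positivity
  have hP1 : (1:Int) ≤ 2 ^ count.toNat := hP
  induction fuel generalizing si with
  | zero =>
    rw [pvOuterA, pvInnerA_eq]
    have hno : ¬ (2 ^ count.toNat * si + 5 * (2 ^ count.toNat - 1) ≤ goal) := by
      push_cast at hfuel; nlinarith
    rw [if_neg hno]
    have : pvQ goal (2 ^ count.toNat) ≤ si := by
      rw [pvQ_le_iff _ _ _ hP]; omega
    omega
  | succ n ih =>
    rw [pvOuterA, pvInnerA_eq]
    by_cases h : 2 ^ count.toNat * si + 5 * (2 ^ count.toNat - 1) ≤ goal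
    · rw [if_pos h]
      have hrec := ih (si + 1) (by omega) (by push_cast at hfuel ⊢; omega)
      simp only [] at hrec ⊢
      rw [hrec]
      have hq : si + 1 ≤ pvQ goal (2 ^ count.toNat) := by
        by_contra hc
        have : pvQ goal (2 ^ count.toNat) ≤ si := by omega
        rw [pvQ_le_iff _ _ _ hP] at this; omega
      omega
    · rw [if_neg h]
      have : pvQ goal (2 ^ count.toNat) ≤ si := by
        rw [pvQ_le_iff _ _ _ hP]; omega
      omega

-- B's doubling loop either runs i all the way to c (p = 2^c) or exits early with 2^j > goal+5
theorem pvPowLoop_spec (goal : Int) (c : Int) (i : Int) (fuel : Nat)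
    (hi : 0 ≤ i) (hic : i ≤ c) (hfuel : (fuel : Int) = c - i) :
    (pvPowLoop goal c (2 ^ i.toNat) i fuel = (2 ^ c.toNat, c) ∧ ¬ c < c) ∨
    (∃ j : Int, pvPowLoop goal c (2 ^ i.toNat) i fuel = (2 ^ j.toNat, j) ∧ i ≤ j ∧ j < c ∧
      goal + 5 < 2 ^ j.toNat) := by
  induction fuel generalizing i with
  | zero =>
    have : i = c := by push_cast at hfuel; omega
    subst this
    exact Or.inl ⟨rfl, lt_irrefl _⟩
  | succ n ih =>
    have hic' : i < c := by push_cast at hfuel; omega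
    rw [pvPowLoop]
    by_cases h : (2:Int) ^ i.toNat ≤ goal + 5
    · rw [if_pos ⟨hic', h⟩]
      have hpow : (2:Int) ^ i.toNat * 2 = 2 ^ (i + 1).toNat := by
        have : (i + 1).toNat = i.toNat + 1 := by omega
        rw [this, pow_succ]
      rw [hpow]
      rcases ih (i + 1) (by omega) (by omega) (by push_cast at hfuel ⊢; omega) with ⟨h1, h2⟩ | ⟨j, hj⟩
      · exact Or.inl ⟨h1, h2⟩
      · exact Or.inr ⟨j, hj.1, by omega, hj.2.2⟩
    · rw [if_neg (by tauto)]
      exact Or.inr ⟨i, rfl, le_refl _, hic', by omega⟩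

theorem find_start_forward_eq_alt (goal count : Int) :
    find_start_forward goal count = find_start_forward_alt goal count := by
  unfold find_start_forward find_start_forward_alt
  by_cases hg : goal < 0
  · rw [if_pos hg, pvOuterA.eq_def, if_neg (by omega)]
  · rw [if_neg hg]
    set c : Int := if count > 0 then count else 0 with hc
    have hc0 : 0 ≤ c := by rw [hc]; split <;> omega
    have hcn : c.toNat = count.toNat := by rw [hc]; split <;> omega
    have hP : (0:Int) < 2 ^ count.toNat := by positivity
    -- A side: one unfolding step, then the loop characterisation
    have hA : pvOuterA goal count 0 0 (goal + 1).toNat = max 1 (pvQ goal (2 ^ count.toNat)) := by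
      have hfuel : (goal + 1).toNat = goal.toNat + 1 := by omega
      rw [hfuel, pvOuterA.eq_def, if_pos (by omega : (0:Int) ≤ goal)]
      simp only []
      have := pvOuterA_eq goal count 1 goal.toNat (le_refl _) (by omega)
      simpa using this
    rw [hA]
    -- B side: the doubling-loop characterisation
    have e1 : (2:Int) ^ (0:Int).toNat = 1 := rfl
    rcases pvPowLoop_spec goal c 0 c.toNat (le_refl _) hc0 (by omega) with ⟨heq, _⟩ | ⟨j, heq, hj0, hjc, hjg⟩
    · rw [e1] at heq
      simp only [heq]
      simp only [lt_irrefl, if_false]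
      rw [hcn]
      have hqdef : PySem.Int.floordiv (goal + 5 - 5 * 2 ^ count.toNat) (2 ^ count.toNat) + 1 = pvQ goal (2 ^ count.toNat) := rfl
      rw [hqdef]
      by_cases hq : pvQ goal (2 ^ count.toNat) > 1
      · rw [if_pos hq]; omega
      · rw [if_neg hq]; omega
    · rw [e1] at heq
      simp only [heq]
      rw [if_pos hjc]
      have hjle : (2:Int) ^ j.toNat ≤ 2 ^ count.toNat := by
        rw [← hcn]
        exact pow_le_pow_right₀ (by norm_num) (by omega)
      have : pvQ goal (2 ^ count.toNat) ≤ 1 := by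
        rw [pvQ_le_iff _ _ _ hP]; nlinarith
      omega

-- ===== VERDICT (by name: the statement is the Claim_ definition above) =====
theorem find_start_forward_spec : Claim_equal_find_start_forward := by
  intro goal count _
  unfold Spec_find_start_forward
  exact find_start_forward_eq_alt goal count
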